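-- pv_equiv track=rewrite | github.com/ucastello/godet | pythonn/Parciales.py | hay_una_recarga
-- ===== SOURCE A (Python) =====
-- def hay_una_recarga (historial:str) ->bool:
--     res:bool = True
--     i:int = 0
--     while historial[i] != 'x':
--         if historial[i] == 's':
--             i += 1
--         elif historial[i] != 'r':
--             return False
--         else:
--             return True
-- ===== SOURCE B (Python) =====
-- def hay_una_recarga(historial: str) -> bool:
--     # Recursive decomposition: peel one leading 's' at a time; at the first
--     # non-'s' character the answer is whether it is 'r'.
--     if historial[0] == 's':
--         return hay_una_recarga(historial[1:])
--     return historial[0] == 'r'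
-- ===== Notes on version B (the rewrite author's own statement) =====
-- stated objective: alternative
-- what changed: Replaces A's index-advancing while loop with a structural recursion on the string suffix (no index, no loop); Pre_ excludes inputs where A raises IndexError (e.g. 's') or returns None instead of a bool (first non-'s' char is 'x', where B returns False).
-- outside the precondition, e.g. on hay_una_recarga('x'): A returns None, B returns False; on hay_una_recarga('sx'): A returns None, B returns False; on hay_una_recarga('s'): A raises IndexError, B raises IndexError
import Mathlib
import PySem

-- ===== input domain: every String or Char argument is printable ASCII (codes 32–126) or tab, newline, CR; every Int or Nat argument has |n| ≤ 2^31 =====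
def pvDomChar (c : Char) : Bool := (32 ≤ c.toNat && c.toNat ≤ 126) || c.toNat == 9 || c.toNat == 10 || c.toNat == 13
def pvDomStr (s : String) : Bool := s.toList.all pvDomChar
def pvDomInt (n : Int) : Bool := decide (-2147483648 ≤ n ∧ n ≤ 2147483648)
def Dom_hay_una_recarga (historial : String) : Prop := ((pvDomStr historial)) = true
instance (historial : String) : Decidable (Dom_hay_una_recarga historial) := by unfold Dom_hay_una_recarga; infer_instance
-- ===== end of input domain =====

-- B replaces A's index-advancing while loop by a structural recursion on the string suffix
-- (objective: alternative decomposition). Equivalence is about the returned bool on Pre_.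

-- ===== PORT A =====
-- A's while loop over an advancing index i; cs[i] out of range = IndexError (false here,
-- but such inputs are outside Pre_); falling out of the loop on 'x' is Python's implicit None
-- (also outside Pre_; false here).
def hay_una_recarga_loop (cs : List Char) (i : Nat) : Bool :=
  if h : i < cs.length then
    if cs[i] ≠ 'x' then
      if cs[i] = 's' then hay_una_recarga_loop cs (i + 1)
      else if cs[i] ≠ 'r' then false
      else true
    else false
  else false
termination_by cs.length - i

def hay_una_recarga (historial : String) : Bool :=
  hay_una_recarga_loop historial.toList 0

-- ===== PORT B =====
-- Source B recurses on historial[1:] while the first char is 's'; historial[0] on the empty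
-- string is IndexError (outside Pre_; false here), otherwise the answer is first char == 'r'.
def hay_una_recarga_alt_rec : List Char → Bool
  | [] => false
  | c :: rest => if c = 's' then hay_una_recarga_alt_rec rest else c = 'r'

def hay_una_recarga_alt (historial : String) : Bool :=
  hay_una_recarga_alt_rec historial.toList

-- ===== PRECONDITION & SPEC =====
-- Pre_ excludes the inputs where A does not return a bool: if every char up to the first
-- non-'s' char is exhausted A raises IndexError, and if the first non-'s' char is 'x' A falls
-- out of the loop and returns None (B returns False there); see claim.json cites.
def Pre_hay_una_recarga (historial : String) : Prop :=
  historial.toList.dropWhile (fun c => c = 's') ≠ [] ∧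
  (historial.toList.dropWhile (fun c => c = 's')).head? ≠ some 'x'
instance (historial : String) : Decidable (Pre_hay_una_recarga historial) := by
  unfold Pre_hay_una_recarga; infer_instance

def pvWitness_hay_una_recarga : String := "ssr"

def Spec_hay_una_recarga (historial : String) (out : Bool) : Prop := out = hay_una_recarga_alt historial
instance (historial : String) (out : Bool) : Decidable (Spec_hay_una_recarga historial out) := by unfold Spec_hay_una_recarga; infer_instance

-- ===== CLAIM (what is proved, stated in full; the proofs are below) =====
def Claim_equal_hay_una_recarga : Prop := ∀ (historial : String), Dom_hay_una_recarga historial → Pre_hay_una_recarga historial → Spec_hay_una_recarga historial (hay_una_recarga historial)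

-- ===== LEMMAS AND PROOFS =====

-- A's loop at index i computes B's recursion on the suffix cs.drop i (fuel induction).
theorem hay_una_recarga_loop_eq_aux (cs : List Char) (n : Nat) :
    ∀ i, cs.length - i ≤ n →
      hay_una_recarga_loop cs i = hay_una_recarga_alt_rec (cs.drop i) := by
  induction n with
  | zero =>
      intro i hle
      rw [hay_una_recarga_loop, dif_neg (by omega), List.drop_eq_nil_of_le (by omega)]
      rfl
  | succ n ih =>
      intro i hle
      rw [hay_una_recarga_loop]
      by_cases h : i < cs.length
      · rw [dif_pos h, List.drop_eq_getElem_cons h, hay_una_recarga_alt_rec]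
        by_cases hx : cs[i] = 'x'
        · rw [if_neg (by simp [hx])]
          simp [hx]
        · rw [if_pos (by simp [hx])]
          by_cases hs : cs[i] = 's'
          · rw [if_pos hs, if_pos hs, ih (i + 1) (by omega)]
          · rw [if_neg hs, if_neg hs]
            by_cases hr : cs[i] = 'r' <;> simp [hr]
      · rw [dif_neg h, List.drop_eq_nil_of_le (by omega)]
        rfl

-- ===== VERDICT (by name: the statement is the Claim_ definition above) =====
theorem hay_una_recarga_spec : Claim_equal_hay_una_recarga := by
  intro historial _ _
  unfold Spec_hay_una_recarga hay_una_recarga hay_una_recarga_alt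
  simpa using hay_una_recarga_loop_eq_aux historial.toList historial.toList.length 0 (by omega)
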